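-- pv_equiv track=rewrite | github.com/CorralNicolas/Algo-1-de-Nicolas | hola2.py | agrupar_por_longitud
-- ===== SOURCE A (Python) =====
-- def agrupar_por_longitud(lista:list[str]) -> dict:
--     diccionario:dict = {}
--     for i in lista:
--         clave = len (i)
--         if clave in diccionario:
--             diccionario[clave] += 1
--         else:
--             diccionario[clave] = 1
--     return diccionario
-- ===== SOURCE B (Python) =====
-- def agrupar_por_longitud(lista: list[str]) -> dict:
--     longitudes = [len(i) for i in lista]
--     return {k: longitudes.count(k) for k in dict.fromkeys(longitudes)}
-- ===== Notes on version B (the rewrite author's own statement) =====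
-- stated objective: alternative
-- what changed: Replaces the single-pass dict of running counters with a two-phase scheme: materialise the length list, dedup the keys in first-occurrence order with dict.fromkeys, and compute each key's count with list.count.
import Mathlib
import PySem

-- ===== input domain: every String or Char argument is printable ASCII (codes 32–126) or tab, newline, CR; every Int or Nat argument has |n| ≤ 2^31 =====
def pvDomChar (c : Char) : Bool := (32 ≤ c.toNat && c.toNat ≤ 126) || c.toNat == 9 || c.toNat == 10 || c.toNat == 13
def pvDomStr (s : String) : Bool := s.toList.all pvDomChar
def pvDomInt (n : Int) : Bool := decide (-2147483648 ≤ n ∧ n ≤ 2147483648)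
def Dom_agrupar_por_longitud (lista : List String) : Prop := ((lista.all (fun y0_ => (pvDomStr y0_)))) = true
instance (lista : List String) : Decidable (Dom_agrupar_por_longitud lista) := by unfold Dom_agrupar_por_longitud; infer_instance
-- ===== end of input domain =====

-- B builds the histogram by listing lengths, deduping keys in first-occurrence order and counting each; same value as A's running-counter dict.

-- ===== PORT A =====
def agrupar_por_longitud (lista : List String) : List (Int × Int) :=
  (lista.foldl (fun d i =>
      let clave : Int := PySem.Str.len i
      if d.contains clave then d.insert clave (d.getD clave 0 + 1)
      else d.insert clave 1) PySem.Dict.empty).items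

-- ===== PORT B =====
def agrupar_por_longitud_alt (lista : List String) : List (Int × Int) :=
  let longitudes : List Int := lista.map (fun i => PySem.Str.len i)
  (PySem.List.dedup longitudes).map (fun k => (k, (PySem.List.count longitudes k : Int)))

-- ===== PRECONDITION & SPEC =====
def Spec_agrupar_por_longitud (lista : List String) (out : List (Int × Int)) : Prop := out = agrupar_por_longitud_alt lista
instance (lista : List String) (out : List (Int × Int)) : Decidable (Spec_agrupar_por_longitud lista out) := by unfold Spec_agrupar_por_longitud; infer_instance

-- ===== CLAIM (what is proved, stated in full; the proofs are below) =====
def Claim_equal_agrupar_por_longitud : Prop := ∀ (lista : List String), Dom_agrupar_por_longitud lista → Spec_agrupar_por_longitud lista (agrupar_por_longitud lista)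

-- ===== LEMMAS AND PROOFS =====

-- A's branch "if clave in d: d[clave] += 1 else: d[clave] = 1" is the counter step d.insert clave (d.getD clave 0 + 1)
theorem pv_stepA_eq (d : PySem.Dict Int Int) (k : Int) :
    (if d.contains k then d.insert k (d.getD k 0 + 1) else d.insert k 1) =
      d.insert k (d.getD k 0 + 1) := by
  by_cases h : d.contains k = true
  · simp [h]
  · simp only [Bool.not_eq_true] at h
    simp [h, PySem.Dict.getD_of_not_contains d 0 h]

-- folding A's counter step over lista equals folding it over the list of lengths
theorem pv_foldl_len (lista : List String) (d : PySem.Dict Int Int) :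
    lista.foldl (fun d i => d.insert (PySem.Str.len i) (d.getD (PySem.Str.len i) 0 + 1)) d =
      (lista.map (fun i => PySem.Str.len i)).foldl (fun d x => d.insert x (d.getD x 0 + 1)) d := by
  induction lista generalizing d with
  | nil => rfl
  | cons a t ih => rw [List.map_cons, List.foldl_cons, List.foldl_cons]; exact ih _

-- ===== VERDICT (by name: the statement is the Claim_ definition above) =====
theorem agrupar_por_longitud_spec : Claim_equal_agrupar_por_longitud := by
  intro lista _
  show agrupar_por_longitud lista = agrupar_por_longitud_alt lista
  unfold agrupar_por_longitud agrupar_por_longitud_alt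
  simp only [pv_stepA_eq]
  rw [pv_foldl_len]
  rw [PySem.Dict.foldl_insert_getD_add_one_eq_counter, PySem.Dict.items_counter]
  simp only [PySem.List.dedup_eq_ofList, PySem.List.count_eq]
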